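-- pv_equiv track=rewrite | github.com/SashaMogilevskii/duplicate_names | script.py | replace_symbols
-- ===== SOURCE A (Python) =====
-- def replace_symbols(company_name):
--     """
--     Delete all symbols in name_company
--     """
--
--     update_name = ''
--
--     for ch in company_name:
--         if ch.isalnum():
--             update_name += ch
--         else:
--             update_name += ' '
--
--     update_name = update_name.strip()
--     update_name = ' '.join(update_name.split())
--
--     return update_name
-- ===== SOURCE B (Python) =====
-- def replace_symbols(company_name):
--     # One-pass tokenizer: collect maximal alphanumeric runs, join with single spaces
--     # (no intermediate space-substituted string, no strip/split pass).
--     tokens = []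
--     current = []
--     for ch in company_name:
--         if ch.isalnum():
--             current.append(ch)
--         elif current:
--             tokens.append(''.join(current))
--             current = []
--     if current:
--         tokens.append(''.join(current))
--     return ' '.join(tokens)
-- ===== Notes on version B (the rewrite author's own statement) =====
-- stated objective: simpler
-- what changed: Instead of building a space-substituted copy of the string and then stripping/splitting/re-joining it, B tokenizes in a single pass, collecting maximal alphanumeric runs into a token list and joining them once.
import Mathlib
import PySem

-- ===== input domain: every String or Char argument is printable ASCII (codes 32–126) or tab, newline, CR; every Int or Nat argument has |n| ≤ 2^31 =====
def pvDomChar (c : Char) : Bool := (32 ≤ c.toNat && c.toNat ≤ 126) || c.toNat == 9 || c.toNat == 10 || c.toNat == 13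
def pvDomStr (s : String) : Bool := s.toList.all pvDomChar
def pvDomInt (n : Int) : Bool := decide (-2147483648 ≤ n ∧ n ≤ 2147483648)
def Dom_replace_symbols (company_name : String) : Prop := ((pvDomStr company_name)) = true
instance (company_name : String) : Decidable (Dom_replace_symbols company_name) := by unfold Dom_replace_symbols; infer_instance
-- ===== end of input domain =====

-- B replaces A's substitute-then-strip/split/join pipeline by a single-pass tokenizer (simpler decomposition, same cost).

-- ===== PORT A =====
def replace_symbols (company_name : String) : String :=
  -- build update_name char by char, replacing non-alnum chars by a space
  let update := company_name.toList.foldl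
    (fun acc ch => if PySem.Chars.isalnum ch then acc ++ [ch] else acc ++ [' ']) []
  -- update_name.strip(); ' '.join(update_name.split())
  let update := PySem.Chars.strip update
  String.ofList (PySem.Chars.join [' '] (PySem.Chars.split₀ update))

-- ===== PORT B =====
def replace_symbols_alt (company_name : String) : String :=
  -- one pass: state (tokens, current); a non-alnum char after a run flushes current
  let st := company_name.toList.foldl
    (fun (st : List (List Char) × List Char) ch =>
      if PySem.Chars.isalnum ch then (st.1, st.2 ++ [ch])
      else if st.2.isEmpty then st else (st.1 ++ [st.2], []))
    ([], [])
  let tokens := if st.2.isEmpty then st.1 else st.1 ++ [st.2]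
  String.ofList (PySem.Chars.join [' '] tokens)

-- ===== PRECONDITION & SPEC =====
def Spec_replace_symbols (company_name : String) (out : String) : Prop := out = replace_symbols_alt company_name
instance (company_name : String) (out : String) : Decidable (Spec_replace_symbols company_name out) := by unfold Spec_replace_symbols; infer_instance

-- ===== CLAIM (what is proved, stated in full; the proofs are below) =====
def Claim_equal_replace_symbols : Prop := ∀ (company_name : String), Dom_replace_symbols company_name → Spec_replace_symbols company_name (replace_symbols company_name)

-- ===== LEMMAS AND PROOFS =====

-- the character substitution A performs
def pvSub (ch : Char) : Char := if PySem.Chars.isalnum ch then ch else ' '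

-- B's loop body
def pvStepB (st : List (List Char) × List Char) (ch : Char) : List (List Char) × List Char :=
  if PySem.Chars.isalnum ch then (st.1, st.2 ++ [ch])
  else if st.2.isEmpty then st else (st.1 ++ [st.2], [])

theorem pvFoldA_eq_map (s : List Char) (acc : List Char) :
    s.foldl (fun acc ch => if PySem.Chars.isalnum ch then acc ++ [ch] else acc ++ [' ']) acc
      = acc ++ s.map pvSub := by
  induction s generalizing acc with
  | nil => simp
  | cons c s ih =>
    simp only [List.foldl_cons, List.map_cons, ih, pvSub]
    split_ifs <;> simp

theorem pvAlnum_not_space (c : Char) (h : PySem.Chars.isalnum c = true) :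
    PySem.Chars.isspace c = false := by
  simp only [PySem.Chars.isalnum, PySem.Chars.isalpha, PySem.Chars.isdigit,
    PySem.Chars.isupper, PySem.Chars.islower, Bool.or_eq_true, Bool.and_eq_true,
    decide_eq_true_eq, Char.le_def, UInt32.le_iff_toNat_le,
    show ('A' : Char).val.toNat = 65 from rfl, show ('Z' : Char).val.toNat = 90 from rfl,
    show ('a' : Char).val.toNat = 97 from rfl, show ('z' : Char).val.toNat = 122 from rfl,
    show ('0' : Char).val.toNat = 48 from rfl, show ('9' : Char).val.toNat = 57 from rfl] at h
  simp only [PySem.Chars.isspace, Char.toNat, Bool.or_eq_false_iff, Bool.and_eq_false_iff,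
    decide_eq_false_iff_not]
  omega

-- an all-whitespace tail behaves like the end of the string for split₀.go
theorem pvGo_all_spaces (ws : List Char) (hws : ∀ c ∈ ws, PySem.Chars.isspace c = true)
    (cur : List Char) (acc : List (List Char)) :
    PySem.Chars.split₀.go ws cur acc = PySem.Chars.split₀.go [] cur acc := by
  induction ws generalizing cur acc with
  | nil => rfl
  | cons c ws ih =>
    have hc : PySem.Chars.isspace c = true := hws c (by simp)
    have hws' : ∀ x ∈ ws, PySem.Chars.isspace x = true :=
      fun x hx => hws x (List.mem_cons_of_mem _ hx)
    rw [show PySem.Chars.split₀.go (c :: ws) cur acc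
        = (if cur.isEmpty then PySem.Chars.split₀.go ws [] acc
           else PySem.Chars.split₀.go ws [] (cur.reverse :: acc)) from by
      simp [PySem.Chars.split₀.go, hc]]
    by_cases hcur : cur = []
    · subst hcur
      simp only [List.isEmpty_nil, if_true]
      rw [ih hws']
    · simp only [List.isEmpty_iff, hcur, if_false]
      rw [ih hws']
      simp [PySem.Chars.split₀.go, List.isEmpty_iff, hcur]

theorem pvGo_append_spaces (t ws : List Char) (hws : ∀ c ∈ ws, PySem.Chars.isspace c = true)
    (cur : List Char) (acc : List (List Char)) :
    PySem.Chars.split₀.go (t ++ ws) cur acc = PySem.Chars.split₀.go t cur acc := by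
  induction t generalizing cur acc with
  | nil =>
    rw [List.nil_append]
    exact pvGo_all_spaces ws hws cur acc
  | cons c t ih =>
    rw [List.cons_append]
    simp only [PySem.Chars.split₀.go]
    split_ifs <;> exact ih _ _

-- leading whitespace (with an empty current run) does not change split₀.go's result
theorem pvGo_lstrip (t : List Char) (acc : List (List Char)) :
    PySem.Chars.split₀.go (List.dropWhile PySem.Chars.isspace t) [] acc
      = PySem.Chars.split₀.go t [] acc := by
  induction t generalizing acc with
  | nil => rfl
  | cons c t ih =>
    by_cases hc : PySem.Chars.isspace c = true
    · rw [List.dropWhile_cons_of_pos hc, ih]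
      simp [PySem.Chars.split₀.go, hc]
    · rw [List.dropWhile_cons_of_neg hc]

-- the strip() before split() is redundant
theorem pvSplit_strip (t : List Char) :
    PySem.Chars.split₀ (PySem.Chars.strip t) = PySem.Chars.split₀ t := by
  unfold PySem.Chars.split₀ PySem.Chars.strip PySem.Chars.rstrip PySem.Chars.lstrip
  set u := List.dropWhile PySem.Chars.isspace t with hu
  have hsplitu : u = (List.dropWhile PySem.Chars.isspace u.reverse).reverse
      ++ (List.takeWhile PySem.Chars.isspace u.reverse).reverse := by
    calc u = u.reverse.reverse := (List.reverse_reverse u).symm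
    _ = ((u.reverse.takeWhile PySem.Chars.isspace)
          ++ (u.reverse.dropWhile PySem.Chars.isspace)).reverse := by
        rw [List.takeWhile_append_dropWhile]
    _ = _ := by rw [List.reverse_append]
  have h1 : PySem.Chars.split₀.go u [] []
      = PySem.Chars.split₀.go (List.dropWhile PySem.Chars.isspace u.reverse).reverse [] [] := by
    conv_lhs => rw [hsplitu]
    exact pvGo_append_spaces _ _
      (fun c hc => List.mem_takeWhile_imp (List.mem_reverse.mp hc)) _ _
  rw [← h1, hu]
  exact pvGo_lstrip t []

-- core correspondence: split₀ over the substituted string computes B's token list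
theorem pvCore (s : List Char) (tokens : List (List Char)) (cur : List Char) :
    PySem.Chars.split₀.go (s.map pvSub) cur.reverse tokens.reverse
      = (if (s.foldl pvStepB (tokens, cur)).2.isEmpty then (s.foldl pvStepB (tokens, cur)).1
         else (s.foldl pvStepB (tokens, cur)).1 ++ [(s.foldl pvStepB (tokens, cur)).2]) := by
  induction s generalizing tokens cur with
  | nil =>
    simp only [List.map_nil, List.foldl_nil, PySem.Chars.split₀.go, List.isEmpty_reverse]
    by_cases h : cur = []
    · subst h; simp
    · simp [List.isEmpty_iff, h]
  | cons c s ih =>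
    simp only [List.map_cons, List.foldl_cons]
    by_cases hc : PySem.Chars.isalnum c = true
    · have hns := pvAlnum_not_space c hc
      rw [show pvSub c = c from by simp [pvSub, hc]]
      rw [show PySem.Chars.split₀.go (c :: List.map pvSub s) cur.reverse tokens.reverse
          = PySem.Chars.split₀.go (List.map pvSub s) (c :: cur.reverse) tokens.reverse from by
        simp [PySem.Chars.split₀.go, hns]]
      rw [show c :: cur.reverse = (cur ++ [c]).reverse from by simp]
      rw [ih tokens (cur ++ [c])]
      simp [pvStepB, hc]
    · rw [show pvSub c = ' ' from by simp [pvSub, hc]]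
      have hsp : PySem.Chars.isspace ' ' = true := by decide
      by_cases hcur : cur = []
      · subst hcur
        rw [show PySem.Chars.split₀.go (' ' :: List.map pvSub s)
              (List.reverse []) tokens.reverse
            = PySem.Chars.split₀.go (List.map pvSub s) (List.reverse []) tokens.reverse from by
          simp [PySem.Chars.split₀.go, hsp]]
        rw [ih tokens []]
        simp [pvStepB, hc]
      · rw [show PySem.Chars.split₀.go (' ' :: List.map pvSub s) cur.reverse tokens.reverse
            = PySem.Chars.split₀.go (List.map pvSub s)
                (List.reverse []) ((tokens ++ [cur]).reverse) from by
          simp [PySem.Chars.split₀.go, hsp, List.isEmpty_iff, hcur]]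
        rw [ih (tokens ++ [cur]) []]
        simp [pvStepB, hc, List.isEmpty_iff, hcur]

-- ===== VERDICT (by name: the statement is the Claim_ definition above) =====
theorem replace_symbols_spec : Claim_equal_replace_symbols := by
  intro s _
  unfold Spec_replace_symbols replace_symbols replace_symbols_alt
  show String.ofList (PySem.Chars.join [' ']
      (PySem.Chars.split₀ (PySem.Chars.strip
        (s.toList.foldl
          (fun acc ch => if PySem.Chars.isalnum ch then acc ++ [ch] else acc ++ [' ']) []))))
    = String.ofList (PySem.Chars.join [' ']
      (if (s.toList.foldl pvStepB ([], [])).2.isEmpty then (s.toList.foldl pvStepB ([], [])).1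
       else (s.toList.foldl pvStepB ([], [])).1 ++ [(s.toList.foldl pvStepB ([], [])).2]))
  rw [pvFoldA_eq_map, List.nil_append, pvSplit_strip]
  rw [show PySem.Chars.split₀ (s.toList.map pvSub)
      = PySem.Chars.split₀.go (s.toList.map pvSub) (List.reverse []) (List.reverse []) from rfl]
  rw [pvCore s.toList [] []]
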